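-- pv_equiv track=rewrite | github.com/zeenayouhan/jira-figma-analyzer | figma_integration.py | _generate_implementation_notes
-- ===== SOURCE A (Python) =====
-- from typing import Dict, List, Optional, Any, Tuple
--
-- def _generate_implementation_notes(ui_components: List[str], screens: List[str]) -> List[str]:
--     """Generate implementation notes based on design analysis."""
--     notes = []
--
--     if len(screens) > 5:
--         notes.append("Complex multi-screen application - consider navigation architecture")
--
--     if any('form' in comp.lower() for comp in ui_components):
--         notes.append("Forms detected - implement validation and error handling")
--
--     if any('list' in comp.lower() for comp in ui_components):
--         notes.append("List components detected - consider pagination and performance")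
--
--     if any('modal' in comp.lower() or 'dialog' in comp.lower() for comp in ui_components):
--         notes.append("Modal dialogs detected - ensure proper focus management")
--
--     return notes
-- ===== SOURCE B (Python) =====
-- def _generate_implementation_notes(ui_components, screens):
--     """Generate implementation notes based on design analysis."""
--     has_form = has_list = has_modal = False
--     for comp in ui_components:
--         c = comp.lower()
--         has_form = has_form or 'form' in c
--         has_list = has_list or 'list' in c
--         has_modal = has_modal or 'modal' in c or 'dialog' in c
--     notes = []
--     if len(screens) > 5:
--         notes.append("Complex multi-screen application - consider navigation architecture")
--     if has_form:
--         notes.append("Forms detected - implement validation and error handling")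
--     if has_list:
--         notes.append("List components detected - consider pagination and performance")
--     if has_modal:
--         notes.append("Modal dialogs detected - ensure proper focus management")
--     return notes
-- ===== Notes on version B (the rewrite author's own statement) =====
-- stated objective: alternative
-- what changed: Replaces three separate any() scans over ui_components with a single accumulating pass that lowercases each component once and sets three flags, then emits the notes from the flags.
import Mathlib
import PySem

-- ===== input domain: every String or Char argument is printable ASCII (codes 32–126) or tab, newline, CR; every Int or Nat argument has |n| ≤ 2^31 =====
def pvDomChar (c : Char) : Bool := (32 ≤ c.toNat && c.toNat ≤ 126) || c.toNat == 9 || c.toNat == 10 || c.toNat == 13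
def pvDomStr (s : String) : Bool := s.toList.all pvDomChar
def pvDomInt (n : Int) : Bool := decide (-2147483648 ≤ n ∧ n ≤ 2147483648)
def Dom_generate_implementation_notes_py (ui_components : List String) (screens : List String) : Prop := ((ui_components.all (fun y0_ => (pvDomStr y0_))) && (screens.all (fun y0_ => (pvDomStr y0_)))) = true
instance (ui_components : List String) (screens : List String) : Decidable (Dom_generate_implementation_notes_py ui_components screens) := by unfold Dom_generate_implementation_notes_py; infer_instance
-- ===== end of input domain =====

-- B replaces A's three separate any() scans with one flag-accumulating pass; objective: alternative (same cost).

-- ===== PORT A =====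
def generate_implementation_notes_py (ui_components : List String) (screens : List String) : List String :=
  let notes : List String := []
  let notes := if screens.length > 5 then
      notes ++ ["Complex multi-screen application - consider navigation architecture"]
    else notes
  let notes := if ui_components.any (fun comp => PySem.Str.isIn "form" (PySem.Str.lower comp)) then
      notes ++ ["Forms detected - implement validation and error handling"]
    else notes
  let notes := if ui_components.any (fun comp => PySem.Str.isIn "list" (PySem.Str.lower comp)) then
      notes ++ ["List components detected - consider pagination and performance"]
    else notes
  let notes := if ui_components.any (fun comp => PySem.Str.isIn "modal" (PySem.Str.lower comp) || PySem.Str.isIn "dialog" (PySem.Str.lower comp)) then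
      notes ++ ["Modal dialogs detected - ensure proper focus management"]
    else notes
  notes

-- ===== PORT B =====
-- single pass: lowercase each component once, accumulate three flags
def generate_implementation_notes_py_alt (ui_components : List String) (screens : List String) : List String :=
  let flags := ui_components.foldl (fun (acc : Bool × Bool × Bool) comp =>
      let c := PySem.Str.lower comp
      (acc.1 || PySem.Str.isIn "form" c,
       acc.2.1 || PySem.Str.isIn "list" c,
       acc.2.2 || PySem.Str.isIn "modal" c || PySem.Str.isIn "dialog" c)) (false, false, false)
  let notes : List String := []
  let notes := if screens.length > 5 then
      notes ++ ["Complex multi-screen application - consider navigation architecture"]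
    else notes
  let notes := if flags.1 then
      notes ++ ["Forms detected - implement validation and error handling"]
    else notes
  let notes := if flags.2.1 then
      notes ++ ["List components detected - consider pagination and performance"]
    else notes
  let notes := if flags.2.2 then
      notes ++ ["Modal dialogs detected - ensure proper focus management"]
    else notes
  notes

-- ===== PRECONDITION & SPEC =====
def Spec_generate_implementation_notes_py (ui_components : List String) (screens : List String) (out : List String) : Prop := out = generate_implementation_notes_py_alt ui_components screens
instance (ui_components : List String) (screens : List String) (out : List String) : Decidable (Spec_generate_implementation_notes_py ui_components screens out) := by unfold Spec_generate_implementation_notes_py; infer_instance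

-- ===== CLAIM (what is proved, stated in full; the proofs are below) =====
def Claim_equal_generate_implementation_notes_py : Prop := ∀ (ui_components : List String) (screens : List String), Dom_generate_implementation_notes_py ui_components screens → Spec_generate_implementation_notes_py ui_components screens (generate_implementation_notes_py ui_components screens)

-- ===== LEMMAS AND PROOFS =====

-- the three-flag fold computes exactly the three any() scans
theorem flags_eq_any (xs : List String) (a b c : Bool) :
    xs.foldl (fun (acc : Bool × Bool × Bool) comp =>
      let cl := PySem.Str.lower comp
      (acc.1 || PySem.Str.isIn "form" cl,
       acc.2.1 || PySem.Str.isIn "list" cl,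
       acc.2.2 || PySem.Str.isIn "modal" cl || PySem.Str.isIn "dialog" cl)) (a, b, c)
    = (a || xs.any (fun comp => PySem.Str.isIn "form" (PySem.Str.lower comp)),
       b || xs.any (fun comp => PySem.Str.isIn "list" (PySem.Str.lower comp)),
       c || xs.any (fun comp => PySem.Str.isIn "modal" (PySem.Str.lower comp) || PySem.Str.isIn "dialog" (PySem.Str.lower comp))) := by
  induction xs generalizing a b c with
  | nil => simp
  | cons x xs ih =>
    simp only [List.foldl_cons, List.any_cons, ih]
    simp [Bool.or_assoc]

-- ===== VERDICT (by name: the statement is the Claim_ definition above) =====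
theorem generate_implementation_notes_py_spec : Claim_equal_generate_implementation_notes_py := by
  intro ui screens _
  unfold Spec_generate_implementation_notes_py generate_implementation_notes_py generate_implementation_notes_py_alt
  simp only [flags_eq_any, Bool.false_or]
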